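-- pv_equiv track=rewrite | github.com/pefontana/hermes-agent | agent/shell_hooks.py | _command_script_path
-- ===== SOURCE A (Python) =====
-- import shlex
-- from typing import Any, Callable, Dict, Iterator, List, Optional, Set, Tuple
--
-- _SCRIPT_EXTENSIONS: Tuple[str, ...] = (
--     ".sh", ".bash", ".zsh", ".fish",
--     ".py", ".pyw",
--     ".rb", ".pl", ".lua",
--     ".js", ".mjs", ".cjs", ".ts",
-- )
--
-- def _command_script_path(command: str) -> str:
--     """Return the script path from ``command`` for doctor / drift checks.
--
--     Prefers a token ending in a known script extension, then a token
--     containing ``/`` or leading ``~``, then the first token.  Handles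
--     ``python3 /path/hook.py``, ``/usr/bin/env bash hook.sh``, and the
--     common bare-path form.
--     """
--     try:
--         parts = shlex.split(command)
--     except ValueError:
--         return command
--     if not parts:
--         return command
--     for part in parts:
--         if part.lower().endswith(_SCRIPT_EXTENSIONS):
--             return part
--     for part in parts:
--         if "/" in part or part.startswith("~"):
--             return part
--     return parts[0]
-- ===== SOURCE B (Python) =====
-- from typing import List, Optional, Tuple
--
-- _SCRIPT_EXTENSIONS: Tuple[str, ...] = (
--     ".sh", ".bash", ".zsh", ".fish",
--     ".py", ".pyw",
--     ".rb", ".pl", ".lua",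
--     ".js", ".mjs", ".cjs", ".ts",
-- )
--
-- _WS = " \t\r\n"
--
-- def _read_sq(tok: str, s: str, i: int):
--     """Consume a single-quoted section starting after the quote; None = unclosed."""
--     while i < len(s):
--         c = s[i]; i += 1
--         if c == "'":
--             return tok, i
--         tok += c
--     return None
--
-- def _read_dq(tok: str, s: str, i: int):
--     """Consume a double-quoted section; backslash escapes only \" and \\; None = unclosed."""
--     while i < len(s):
--         c = s[i]; i += 1
--         if c == '"':
--             return tok, i
--         if c == "\\":
--             if i >= len(s):
--                 return None
--             nc = s[i]; i += 1
--             if nc != '"' and nc != "\\":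
--                 tok += "\\"
--             tok += nc
--         else:
--             tok += c
--     return None
--
-- def _read_tok(s: str, i: int):
--     """Read one token starting at a non-whitespace position; stop before whitespace."""
--     tok = ""
--     while i < len(s):
--         c = s[i]
--         if c in _WS:
--             return tok, i
--         i += 1
--         if c == "'":
--             r = _read_sq(tok, s, i)
--             if r is None:
--                 return None
--             tok, i = r
--         elif c == '"':
--             r = _read_dq(tok, s, i)
--             if r is None:
--                 return None
--             tok, i = r
--         elif c == "\\":
--             if i >= len(s):
--                 return None
--             tok += s[i]; i += 1
--         else:
--             tok += c
--     return tok, i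
--
-- def _tokens(s: str) -> Optional[List[str]]:
--     """POSIX shell tokenization by recursive-descent style scanning; None = lexing error."""
--     toks: List[str] = []
--     i = 0
--     n = len(s)
--     while True:
--         while i < n and s[i] in _WS:
--             i += 1
--         if i >= n:
--             return toks
--         r = _read_tok(s, i)
--         if r is None:
--             return None
--         tok, i = r
--         toks.append(tok)
--
-- def _priority(part: str) -> int:
--     if part.lower().endswith(_SCRIPT_EXTENSIONS):
--         return 0
--     if "/" in part or part.startswith("~"):
--         return 1
--     return 2
--
-- def _command_script_path(command: str) -> str:
--     parts = _tokens(command)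
--     if not parts:
--         return command
--     return min(parts, key=_priority)
-- ===== Notes on version B (the rewrite author's own statement) =====
-- stated objective: alternative
-- what changed: B tokenizes with token-at-a-time index scans (skip whitespace, then read one whole token with dedicated quoted-section readers) instead of A's shlex.split character-state machine, returning None instead of catching ValueError, and replaces A's two sequential scans plus parts[0] fallback with one min(parts, key=priority) selection over a 3-level priority, relying on min's first-minimum stability.
import Mathlib
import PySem

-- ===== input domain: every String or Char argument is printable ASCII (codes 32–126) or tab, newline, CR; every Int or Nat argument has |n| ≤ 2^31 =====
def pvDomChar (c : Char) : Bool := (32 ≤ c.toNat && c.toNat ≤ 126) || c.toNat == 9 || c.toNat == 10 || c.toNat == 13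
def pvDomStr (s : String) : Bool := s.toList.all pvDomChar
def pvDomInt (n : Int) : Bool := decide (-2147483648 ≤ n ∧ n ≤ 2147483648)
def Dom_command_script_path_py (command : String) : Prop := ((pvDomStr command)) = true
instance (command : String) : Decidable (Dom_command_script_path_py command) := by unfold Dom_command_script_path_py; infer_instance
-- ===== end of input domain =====

-- B tokenizes by index-driven token reads (skip whitespace, read one whole token at a time via
-- _read_tok/_read_sq/_read_dq) instead of A's single character-at-a-time shlex state machine,
-- and selects the result with one min(parts, key=priority) instead of A's two scans + fallback.

-- ===== PORT A =====

-- Hand port of shlex.split(command) (posix=True, whitespace_split=True, comments off), exact for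
-- the ASCII domain: whitespace splits, '...' literal, "..." with backslash escaping only of " and \,
-- backslash escapes the next char outside quotes; `none` = ValueError (unclosed quote / trailing \).
inductive ShState : Type
  | space | word | sq | dq
deriving DecidableEq, Repr

def isWs (c : Char) : Bool := c = ' ' || c = '\t' || c = '\r' || c = '\n'

def shlexLoop : List Char → ShState → List Char → Bool → List String → Option (List String)
  | [], st, tok, seen, acc =>
    match st with
    | .sq => none
    | .dq => none
    | _ => some (if seen then acc ++ [String.mk tok] else acc)
  | c :: rest, .space, tok, seen, acc =>
    if isWs c then
      shlexLoop rest .space [] false (if seen then acc ++ [String.mk tok] else acc)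
    else if c = '\\' then
      match rest with
      | [] => none
      | nc :: rest' => shlexLoop rest' .word (tok ++ [nc]) true acc
    else if c = '\'' then shlexLoop rest .sq tok true acc
    else if c = '"' then shlexLoop rest .dq tok true acc
    else shlexLoop rest .word (tok ++ [c]) true acc
  | c :: rest, .word, tok, seen, acc =>
    if isWs c then
      shlexLoop rest .space [] false (if seen then acc ++ [String.mk tok] else acc)
    else if c = '\'' then shlexLoop rest .sq tok true acc
    else if c = '"' then shlexLoop rest .dq tok true acc
    else if c = '\\' then
      match rest with
      | [] => none
      | nc :: rest' => shlexLoop rest' .word (tok ++ [nc]) seen acc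
    else shlexLoop rest .word (tok ++ [c]) seen acc
  | c :: rest, .sq, tok, seen, acc =>
    if c = '\'' then shlexLoop rest .word tok seen acc
    else shlexLoop rest .sq (tok ++ [c]) seen acc
  | c :: rest, .dq, tok, seen, acc =>
    if c = '"' then shlexLoop rest .word tok seen acc
    else if c = '\\' then
      match rest with
      | [] => none
      | nc :: rest' =>
        shlexLoop rest' .dq
          (if nc ≠ '"' ∧ nc ≠ '\\' then tok ++ ['\\', nc] else tok ++ [nc]) seen acc
    else shlexLoop rest .dq (tok ++ [c]) seen acc
termination_by cs => cs.length
decreasing_by all_goals (simp_all; try omega)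

def pyShlexSplit (s : String) : Option (List String) :=
  shlexLoop s.toList .space [] false []

def scriptExtensions : List String :=
  [".sh", ".bash", ".zsh", ".fish", ".py", ".pyw", ".rb", ".pl", ".lua",
   ".js", ".mjs", ".cjs", ".ts"]

-- part.lower().endswith(_SCRIPT_EXTENSIONS)  (tuple argument = any of them)
def isScriptTok (p : String) : Bool :=
  scriptExtensions.any (fun e => PySem.Str.endswith (PySem.Str.lower p) e)

-- "/" in part or part.startswith("~")
def isPathTok (p : String) : Bool :=
  PySem.Str.isIn "/" p || PySem.Str.startswith p "~"

-- A's first for-loop (early return on first match)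
def firstExt : List String → Option String
  | [] => none
  | p :: rest => if isScriptTok p then some p else firstExt rest

-- A's second for-loop
def firstPath : List String → Option String
  | [] => none
  | p :: rest => if isPathTok p then some p else firstPath rest

def command_script_path_py (command : String) : String :=
  match pyShlexSplit command with
  | none => command
  | some [] => command
  | some (p :: rest) =>
    match firstExt (p :: rest) with
    | some x => x
    | none =>
      match firstPath (p :: rest) with
      | some x => x
      | none => p

-- B's tokenizer: token-at-a-time reads over the remaining character list (the Lean rendering of
-- Source B's index loops; the fuel argument is the loop bound — one unit per consumed character, so
-- fuel = length + 1 never runs out). readSq/readDq consume a quoted section, readTok one whole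
-- token, tokens skips whitespace and collects tokens; `none` = lexing error, exactly Source B's None.

def readSq : List Char → List Char → Option (List Char × List Char)
  | _, [] => none
  | tok, c :: r => if c = '\'' then some (tok, r) else readSq (tok ++ [c]) r

def readDq : List Char → List Char → Option (List Char × List Char)
  | _, [] => none
  | tok, c :: r =>
    if c = '"' then some (tok, r)
    else if c = '\\' then
      match r with
      | [] => none
      | nc :: r' => readDq (tok ++ (if nc ≠ '"' ∧ nc ≠ '\\' then ['\\', nc] else [nc])) r'
    else readDq (tok ++ [c]) r

def readTok : Nat → List Char → List Char → Option (List Char × List Char)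
  | _, tok, [] => some (tok, [])
  | 0, _, _ :: _ => none
  | fuel + 1, tok, c :: r =>
    if isWs c then some (tok, c :: r)
    else if c = '\'' then
      match readSq tok r with
      | none => none
      | some (t, r') => readTok fuel t r'
    else if c = '"' then
      match readDq tok r with
      | none => none
      | some (t, r') => readTok fuel t r'
    else if c = '\\' then
      match r with
      | [] => none
      | nc :: r' => readTok fuel (tok ++ [nc]) r'
    else readTok fuel (tok ++ [c]) r

def tokens : Nat → List Char → Option (List String)
  | 0, _ => none
  | fuel + 1, cs =>
    match cs.dropWhile isWs with
    | [] => some []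
    | c :: r =>
      match readTok fuel [] (c :: r) with
      | none => none
      | some (t, rest) =>
        match tokens fuel rest with
        | none => none
        | some ts => some (String.mk t :: ts)

def priority (p : String) : Int :=
  if isScriptTok p then 0 else if isPathTok p then 1 else 2

def command_script_path_py_alt (command : String) : String :=
  match tokens (command.toList.length + 1) command.toList with
  | none => command
  | some [] => command
  | some (p :: rest) =>
    match PySem.List.min? (p :: rest) priority with
    | some m => m
    | none => command  -- unreachable: the list is nonempty

-- ===== PRECONDITION & SPEC =====
def Spec_command_script_path_py (command : String) (out : String) : Prop := out = command_script_path_py_alt command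
instance (command : String) (out : String) : Decidable (Spec_command_script_path_py command out) := by unfold Spec_command_script_path_py; infer_instance

-- ===== CLAIM (what is proved, stated in full; the proofs are below) =====
def Claim_equal_command_script_path_py : Prop := ∀ (command : String), Dom_command_script_path_py command → Spec_command_script_path_py command (command_script_path_py command)

-- ===== LEMMAS AND PROOFS =====

theorem readSq_rest_lt (tok cs : List Char) (t r : List Char)
    (h : readSq tok cs = some (t, r)) : r.length < cs.length := by
  induction tok, cs using readSq.induct with
  | case1 x => simp [readSq] at h
  | case2 tok cr =>
    simp [readSq] at h
    rcases h with ⟨h1, h2⟩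
    subst h2
    simp only [List.length_cons]
    omega
  | case3 tok c cr hc ih =>
    simp [readSq, hc] at h
    exact Nat.lt_succ_of_lt (ih h)

theorem readDq_rest_lt (tok cs : List Char) (t r : List Char)
    (h : readDq tok cs = some (t, r)) : r.length < cs.length := by
  induction tok, cs using readDq.induct with
  | case1 x => simp [readDq.eq_def] at h
  | case2 tok cr =>
    simp [readDq.eq_def] at h
    rcases h with ⟨h1, h2⟩
    subst h2
    simp only [List.length_cons]
    omega
  | case3 tok _ => simp [readDq.eq_def] at h
  | case4 tok nc r' _ ih =>
    rw [readDq.eq_def] at h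
    simp only [reduceIte, if_neg (by decide : ¬('\\' = '"'))] at h
    have := ih h
    simp at this ⊢
    omega
  | case5 tok c cr hc hbs ih =>
    rw [readDq.eq_def] at h
    simp only [hc, hbs, reduceIte] at h
    exact Nat.lt_succ_of_lt (ih h)


theorem readTok_rest_le (f : Nat) (tok cs : List Char) (t r : List Char)
    (h : readTok f tok cs = some (t, r)) : r.length ≤ cs.length := by
  induction f generalizing tok cs t r with
  | zero =>
    cases cs with
    | nil => simp [readTok] at h; simp [← h.2]
    | cons c cr => simp [readTok] at h
  | succ f ih =>
    cases cs with
    | nil => simp [readTok] at h; simp [← h.2]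
    | cons c cr =>
      by_cases hws : isWs c = true
      · simp [readTok, hws] at h
        rcases h with ⟨h1, h2⟩
        subst h2
        simp
      · by_cases h1 : c = '\''
        · subst h1
          simp [readTok, hws] at h
          cases hsq : readSq tok cr with
          | none => rw [hsq] at h; simp at h
          | some p =>
            obtain ⟨t', r'⟩ := p
            rw [hsq] at h
            have := ih _ _ _ _ h
            have := readSq_rest_lt _ _ _ _ hsq
            simp only [List.length_cons]
            omega
        · by_cases h2 : c = '"'
          · subst h2
            simp [readTok, hws, h1] at h
            cases hdq : readDq tok cr with
            | none => rw [hdq] at h; simp at h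
            | some p =>
              obtain ⟨t', r'⟩ := p
              rw [hdq] at h
              have := ih _ _ _ _ h
              have := readDq_rest_lt _ _ _ _ hdq
              simp only [List.length_cons]
              omega
          · by_cases h3 : c = '\\'
            · subst h3
              simp [readTok, hws, h1, h2] at h
              cases cr with
              | nil => simp at h
              | cons nc r' =>
                have := ih _ _ _ _ h
                simp only [List.length_cons] at *
                omega
            · simp [readTok, hws, h1, h2, h3] at h
              have := ih _ _ _ _ h
              simp only [List.length_cons]
              omega

theorem readTok_rest_ws (f : Nat) (tok cs : List Char) (t : List Char) (d : Char) (r : List Char)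
    (h : readTok f tok cs = some (t, d :: r)) : isWs d = true := by
  induction f generalizing tok cs t with
  | zero =>
    cases cs with
    | nil => simp [readTok] at h
    | cons c cr => simp [readTok] at h
  | succ f ih =>
    cases cs with
    | nil => simp [readTok] at h
    | cons c cr =>
      by_cases hws : isWs c = true
      · simp [readTok, hws] at h
        rw [← h.2.1]
        exact hws
      · by_cases h1 : c = '\''
        · subst h1
          simp [readTok, hws] at h
          cases hsq : readSq tok cr with
          | none => rw [hsq] at h; simp at h
          | some p =>
            obtain ⟨t', r'⟩ := p
            rw [hsq] at h
            exact ih _ _ _ h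
        · by_cases h2 : c = '"'
          · subst h2
            simp [readTok, hws, h1] at h
            cases hdq : readDq tok cr with
            | none => rw [hdq] at h; simp at h
            | some p =>
              obtain ⟨t', r'⟩ := p
              rw [hdq] at h
              exact ih _ _ _ h
          · by_cases h3 : c = '\\'
            · subst h3
              simp [readTok, hws, h1, h2] at h
              cases cr with
              | nil => simp at h
              | cons nc r' => exact ih _ _ _ h
            · simp [readTok, hws, h1, h2, h3] at h
              exact ih _ _ _ h

-- A's tokenizer state machine computes exactly B's token-at-a-time reads:
theorem shlex_sq_eq_readSq (tok cs : List Char) (seen : Bool) (acc : List String) :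
    shlexLoop cs .sq tok seen acc =
      match readSq tok cs with
      | none => none
      | some (t, r) => shlexLoop r .word t seen acc := by
  induction tok, cs using readSq.induct with
  | case1 x => simp [shlexLoop, readSq]
  | case2 tok cr => simp [shlexLoop, readSq]
  | case3 tok c cr hc ih =>
    rw [shlexLoop.eq_def]
    rw [readSq.eq_def]
    simp [hc, ih]

theorem shlex_dq_eq_readDq (tok cs : List Char) (seen : Bool) (acc : List String) :
    shlexLoop cs .dq tok seen acc =
      match readDq tok cs with
      | none => none
      | some (t, r) => shlexLoop r .word t seen acc := by
  induction tok, cs using readDq.induct with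
  | case1 x => simp [shlexLoop, readDq.eq_def]
  | case2 tok cr =>
    rw [shlexLoop.eq_def, readDq.eq_def]
    simp
  | case3 tok hbs =>
    rw [shlexLoop.eq_def, readDq.eq_def]
    simp
  | case4 tok nc r' hbs ih =>
    rw [shlexLoop.eq_def, readDq.eq_def]
    simp only [reduceIte, if_neg (by decide : ¬('\\' = '"'))]
    split_ifs <;> simp_all
  | case5 tok c cr hc hbs ih =>
    rw [shlexLoop.eq_def, readDq.eq_def]
    simp [hc, hbs, ih]

theorem shlex_word_eq_readTok : ∀ (f : Nat) (cs : List Char), cs.length ≤ f →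
    ∀ (tok : List Char) (acc : List String),
    shlexLoop cs .word tok true acc =
      match readTok f tok cs with
      | none => none
      | some (t, []) => some (acc ++ [String.mk t])
      | some (t, _ :: r') => shlexLoop r' .space [] false (acc ++ [String.mk t]) := by
  intro f
  induction f with
  | zero =>
    intro cs hcs tok acc
    have : cs = [] := List.length_eq_zero_iff.mp (Nat.le_zero.mp hcs)
    subst this
    simp [shlexLoop, readTok]
  | succ f ih =>
    intro cs hcs tok acc
    cases cs with
    | nil => simp [shlexLoop, readTok]
    | cons c r =>
      by_cases hws : isWs c = true
      · rw [shlexLoop.eq_def]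
        simp [readTok, hws]
      · by_cases h1 : c = '\''
        · subst h1
          rw [shlexLoop.eq_def]
          simp only [readTok, hws, Bool.false_eq_true, if_false, reduceIte]
          rw [shlex_sq_eq_readSq]
          cases hsq : readSq tok r with
          | none => rfl
          | some p =>
            obtain ⟨t', r'⟩ := p
            exact ih r' (by have := readSq_rest_lt _ _ _ _ hsq; simp at hcs; omega) t' acc
        · by_cases h2 : c = '"'
          · subst h2
            rw [shlexLoop.eq_def]
            simp only [readTok, hws, Bool.false_eq_true, if_false, if_neg h1, reduceIte]
            rw [shlex_dq_eq_readDq]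
            cases hdq : readDq tok r with
            | none => rfl
            | some p =>
              obtain ⟨t', r'⟩ := p
              exact ih r' (by have := readDq_rest_lt _ _ _ _ hdq; simp at hcs; omega) t' acc
          · by_cases h3 : c = '\\'
            · subst h3
              rw [shlexLoop.eq_def]
              simp only [readTok, hws, Bool.false_eq_true, if_false, if_neg h1, if_neg h2,
                reduceIte]
              cases r with
              | nil => rfl
              | cons nc r' =>
                exact ih r' (by simp at hcs; omega) (tok ++ [nc]) acc
            · rw [shlexLoop.eq_def]
              simp only [readTok, hws, Bool.false_eq_true, if_false, if_neg h1, if_neg h2,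
                if_neg h3]
              exact ih r (by simp at hcs; omega) (tok ++ [c]) acc

theorem space_step (c : Char) (r : List Char) (acc : List String) (hws : isWs c = false) :
    shlexLoop (c :: r) .space [] false acc = shlexLoop (c :: r) .word [] true acc := by
  rw [shlexLoop.eq_def]
  conv_rhs => rw [shlexLoop.eq_def]
  simp only [hws, Bool.false_eq_true, if_false]
  split_ifs <;> simp_all

theorem tokens_cons_ws (f : Nat) (c : Char) (r : List Char) (hws : isWs c = true) :
    tokens f (c :: r) = tokens f r := by
  cases f with
  | zero => rfl
  | succ f => simp [tokens, List.dropWhile_cons_of_pos hws]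

theorem tokens_nil (f : Nat) (hf : 0 < f) : tokens f [] = some [] := by
  cases f with
  | zero => omega
  | succ f => simp [tokens]

theorem shlex_space_eq_tokens : ∀ (n : Nat) (cs : List Char), cs.length ≤ n →
    ∀ (f : Nat), cs.length < f → ∀ (acc : List String),
    shlexLoop cs .space [] false acc =
      match tokens f cs with
      | none => none
      | some ts => some (acc ++ ts) := by
  intro n
  induction n with
  | zero =>
    intro cs hcs f hf acc
    have : cs = [] := List.length_eq_zero_iff.mp (Nat.le_zero.mp hcs)
    subst this
    simp [shlexLoop, tokens_nil f hf]
  | succ n ih =>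
    intro cs hcs f hf acc
    cases cs with
    | nil => simp [shlexLoop, tokens_nil f hf]
    | cons c r =>
      by_cases hws : isWs c = true
      · rw [shlexLoop.eq_def]
        simp only [hws, if_pos, Bool.false_eq_true, reduceIte]
        rw [tokens_cons_ws f c r hws]
        exact ih r (by simp at hcs ⊢; omega) f (by simp at hf ⊢; omega) acc
      · cases f with
        | zero => omega
        | succ f =>
          rw [space_step c r acc (by simpa using hws)]
          rw [shlex_word_eq_readTok f (c :: r) (by simp at hf ⊢; omega) [] acc]
          rw [tokens]
          rw [List.dropWhile_cons_of_neg (by simp [hws])]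
          dsimp only
          cases hrt : readTok f [] (c :: r) with
          | none => rfl
          | some p =>
            obtain ⟨t, rest⟩ := p
            cases rest with
            | nil =>
              have hf' : 0 < f := by simp at hf; omega
              simp [tokens_nil f hf']
            | cons d r'' =>
              have hd : isWs d = true := readTok_rest_ws _ _ _ _ _ _ hrt
              have hrl := readTok_rest_le _ _ _ _ _ hrt
              dsimp only
              rw [ih r'' (by simp at hrl hcs; omega) f (by simp at hrl hf; omega)
                (acc ++ [String.mk t])]
              rw [tokens_cons_ws f d r'' hd]
              cases tokens f r'' with
              | none => rfl
              | some ts => simp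

-- A's selection on a nonempty list m :: t, as one function
def fmSel (m : String) (t : List String) : String :=
  match firstExt (m :: t) with
  | some x => x
  | none =>
    match firstPath (m :: t) with
    | some x => x
    | none => m

theorem min_fold (t : List String) (m : String) :
    t.foldl
      (fun acc x =>
        match acc with
        | none => some x
        | some m => if priority x < priority m then some x else some m)
      (some m) = some (fmSel m t) := by
  induction t generalizing m with
  | nil => simp only [List.foldl, fmSel, firstExt, firstPath]; split_ifs <;> rfl
  | cons x t ih =>
    simp only [List.foldl]
    by_cases hm : isScriptTok m = true
    · have : ¬ priority x < priority m := by
        simp only [priority]; split_ifs <;> omega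
      simp [this, ih, fmSel, firstExt, hm]
    · by_cases hx : isScriptTok x = true
      · have : priority x < priority m := by
          simp only [priority]; split_ifs <;> omega
        simp [this, ih, fmSel, firstExt, hm, hx]
      · by_cases hpm : isPathTok m = true
        · have : ¬ priority x < priority m := by
            simp only [priority]; split_ifs <;> omega
          simp [this, ih, fmSel, firstExt, firstPath, hm, hx, hpm]
        · by_cases hpx : isPathTok x = true
          · have : priority x < priority m := by
              simp only [priority]; split_ifs; omega
            simp [this, ih, fmSel, firstExt, firstPath, hm, hx, hpm, hpx]
          · have : ¬ priority x < priority m := by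
              simp only [priority]; split_ifs; omega
            simp [this, ih, fmSel, firstExt, firstPath, hm, hx, hpm, hpx]

theorem min?_eq_fmSel (p : String) (rest : List String) :
    PySem.List.min? (p :: rest) priority = some (fmSel p rest) := by
  simp only [PySem.List.min?, List.foldl]
  refine Eq.trans ?_ (min_fold rest p)
  congr 1
  funext acc x
  cases acc <;> rfl

-- ===== VERDICT (by name: the statement is the Claim_ definition above) =====
theorem command_script_path_py_spec : Claim_equal_command_script_path_py := by
  intro command _
  unfold Spec_command_script_path_py command_script_path_py command_script_path_py_alt pyShlexSplit
  rw [shlex_space_eq_tokens command.toList.length command.toList le_rfl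
    (command.toList.length + 1) (by omega) []]
  cases tokens (command.toList.length + 1) command.toList with
  | none => rfl
  | some ts =>
    cases ts with
    | nil => rfl
    | cons p rest => simp [min?_eq_fmSel, fmSel]
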